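-- pv_equiv track=rewrite | github.com/zurukumo/atcoder | contests/abc121/d.py | f
-- ===== SOURCE A (Python) =====
-- def f(x):
--     ret = 0
--     b = 1
--     for i in range(44):
--         c = (x // (b * 2)) * b
--         rest = x % (b * 2)
--         if rest - b > 0:
--             c += rest - b
--         if c & 1:
--             ret += 1 << i
--         b <<= 1
--     return ret
-- ===== SOURCE B (Python) =====
-- def f(x):
--     # closed form for the cumulative XOR 0^1^...^(x-1), by x mod 4
--     r = x % 4
--     if r == 0:
--         return 0
--     if r == 1:
--         return x - 1
--     if r == 2:
--         return 1
--     return x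
-- ===== Notes on version B (the rewrite author's own statement) =====
-- stated objective: simpler
-- what changed: Replaces the 44-iteration per-bit counting loop with the standard O(1) closed form for XOR of 0..x-1 given by a four-way case split on x % 4.
-- intended difference: On negative odd x, A returns the closed-form value shifted by 2^44 into [0, 2^44) (e.g. f(-3) = 17592186044412), an artefact of its fixed 44-bit accumulation; B returns the plain closed-form value (x-1 or x), the consistent extension of what A computes on every other input. — e.g. on f(-3): A returns 17592186044412, B returns -4
import Mathlib
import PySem

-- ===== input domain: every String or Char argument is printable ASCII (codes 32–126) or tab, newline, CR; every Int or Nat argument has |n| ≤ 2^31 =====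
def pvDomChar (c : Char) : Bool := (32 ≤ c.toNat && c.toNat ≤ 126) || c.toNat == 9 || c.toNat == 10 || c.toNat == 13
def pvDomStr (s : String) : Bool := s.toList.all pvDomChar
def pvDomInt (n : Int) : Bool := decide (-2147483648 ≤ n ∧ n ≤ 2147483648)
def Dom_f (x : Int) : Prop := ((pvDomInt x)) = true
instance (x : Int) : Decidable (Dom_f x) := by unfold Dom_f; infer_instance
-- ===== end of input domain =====

-- B replaces A's 44-iteration per-bit counting loop by the closed form for the XOR of 0..x-1
-- (a four-way case split on x % 4): simpler, one arithmetic case split instead of a loop.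

-- ===== PORT A =====
def f (x : Int) : Int :=
  ((PySem.List.pyRange 0 44 1).foldl
    (fun (s : Int × Int) (i : Int) =>
      let c := PySem.Int.floordiv x (s.2 * 2) * s.2
      let rest := PySem.Int.mod x (s.2 * 2)
      let c := if rest - s.2 > 0 then c + (rest - s.2) else c
      -- `if c & 1: ret += 1 << i`; i ranges over 0..43, so `1 << i` is `1 <<< i.toNat`
      let ret := if PySem.Int.band c 1 ≠ 0 then s.1 + ((1 : Int) <<< i.toNat) else s.1
      (ret, s.2 <<< (1 : Nat)))
    (0, 1)).1

-- ===== PORT B =====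
def f_alt (x : Int) : Int :=
  let r := PySem.Int.mod x 4
  if r = 0 then 0
  else if r = 1 then x - 1
  else if r = 2 then 1
  else x

-- ===== PRECONDITION & SPEC =====
-- On negative odd x, A returns the closed-form value shifted by 2^44 into [0, 2^44)
-- (e.g. f(-3) = 17592186044412), an artefact of its fixed 44-bit accumulation; B returns the
-- plain closed-form value (x-1 or x), the consistent extension of A's value on every other input.
def D_f (x : Int) : Prop := x < 0 ∧ PySem.Int.mod x 2 = 1
instance (x : Int) : Decidable (D_f x) := by unfold D_f; infer_instance

def Spec_f (x : Int) (out : Int) : Prop := ¬ D_f x → out = f_alt x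
instance (x : Int) (out : Int) : Decidable (Spec_f x out) := by unfold Spec_f; infer_instance

def pvDiffWitness_f : Int := (-3)
def pvDiffWitnessOut_f : Int × Int := (17592186044412, -4)

-- ===== CLAIM (what is proved, stated in full; the proofs are below) =====
def Claim_unchanged_f : Prop := ∀ (x : Int), Dom_f x → Spec_f x (f x)
def Claim_changed_f : Prop := Dom_f (pvDiffWitness_f) ∧ D_f (pvDiffWitness_f) ∧ f (pvDiffWitness_f) = pvDiffWitnessOut_f.1 ∧ f_alt (pvDiffWitness_f) = pvDiffWitnessOut_f.2 ∧ pvDiffWitnessOut_f.1 ≠ pvDiffWitnessOut_f.2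
def Claim_exact_f : Prop := ∀ (x : Int), Dom_f x → D_f x → f x ≠ f_alt x

-- ===== LEMMAS AND PROOFS =====

-- the n ≥ 1 bit of the invariant, in plain arithmetic: the parity A tests at bit position
-- n = k+1 (with e = 2^k) equals bit n of the closed form, as a telescoping difference
lemma pv_bit_succ (x q r e : Int) (he : 1 ≤ e) (hr : r = x % (4*e)) :
    (if (if r - 2*e > 0 then q*(2*e) + (r - 2*e) else q*(2*e)) % 2 ≠ 0 then 2*e else 0)
    = (if x % 4 = 0 then 0 else if x % 4 = 1 then x - 1 else if x % 4 = 2 then 1 else x) % (4*e)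
    - (if x % 4 = 0 then 0 else if x % 4 = 1 then x - 1 else if x % 4 = 2 then 1 else x) % (2*e) := by
  have hr0 : 0 ≤ r := by rw [hr]; exact Int.emod_nonneg x (by omega)
  have hr4 : r < 4*e := by rw [hr]; exact Int.emod_lt_of_pos x (by omega)
  have hqe : (q*(2*e)) % 2 = 0 := by
    have h : q*(2*e) = 2*(q*e) := by ring
    rw [h]; exact Int.mul_emod_right 2 (q*e)
  have hx2 : r % 2 = x % 2 := by rw [hr]; exact Int.emod_emod_of_dvd x ⟨2*e, by ring⟩
  have hx42 : (x % 4) % 2 = x % 2 := Int.emod_emod_of_dvd x (by norm_num)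
  have hs : x % (2*e) = r % (2*e) := by rw [hr]; exact (Int.emod_emod_of_dvd x ⟨2, by ring⟩).symm
  have hse : r % (2*e) = if 2*e ≤ r then r - 2*e else r := by
    split_ifs with h
    · have h2 : r = (r - 2*e) + (2*e)*1 := by ring
      rw [h2, Int.add_mul_emod_self_left]
      have h3 : (r - 2*e) + (2*e)*1 - 2*e = r - 2*e := by ring
      rw [h3]
      exact Int.emod_eq_of_lt (by omega) (by omega)
    · exact Int.emod_eq_of_lt hr0 (by omega)
  set A := q*(2*e) with hA
  have h40 : x % 4 = 0 ∨ x % 4 = 1 ∨ x % 4 = 2 ∨ x % 4 = 3 := by omega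
  rcases h40 with h4 | h4 | h4 | h4
  · -- x ≡ 0 (mod 4): F = 0, everything even
    simp only [h4]
    norm_num
    split_ifs <;> omega
  · -- x ≡ 1 (mod 4): F = x - 1, x odd
    have hx1 : (x-1) % (4*e) = r - 1 := by
      rw [Int.sub_emod, ← hr, Int.emod_eq_of_lt (a := 1) (by omega) (by omega)]
      exact Int.emod_eq_of_lt (by omega) (by omega)
    have hx12 : (x-1) % (2*e) = r % (2*e) - 1 := by
      rw [Int.sub_emod, hs, Int.emod_eq_of_lt (a := 1) (by omega) (by omega), hse]
      split_ifs with h <;> exact Int.emod_eq_of_lt (by omega) (by omega)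
    simp only [h4]
    norm_num
    rw [hx1, hx12, hse]
    split_ifs <;> omega
  · -- x ≡ 2 (mod 4): F = 1, x even
    have h1a : (1:Int) % (4*e) = 1 := Int.emod_eq_of_lt (by omega) (by omega)
    have h1b : (1:Int) % (2*e) = 1 := Int.emod_eq_of_lt (by omega) (by omega)
    simp only [h4]
    norm_num
    rw [h1a, h1b]
    split_ifs <;> omega
  · -- x ≡ 3 (mod 4): F = x, x odd
    simp only [h4]
    norm_num
    rw [← hr, hs, hse]
    split_ifs <;> omega
-- bit n of f_alt x, as the telescoping difference of truncations, equals the parity A tests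
lemma pv_bit_lemma (x : Int) (n : Nat) :
    (if PySem.Int.band
        ((if PySem.Int.mod x ((2:Int)^n * 2) - 2^n > 0
          then PySem.Int.floordiv x ((2:Int)^n * 2) * 2^n + (PySem.Int.mod x ((2:Int)^n * 2) - 2^n)
          else PySem.Int.floordiv x ((2:Int)^n * 2) * 2^n)) 1 ≠ 0
     then ((2:Int)^n) else 0)
    = f_alt x % (2^(n+1)) - f_alt x % (2^n) := by
  have hE : (0:Int) < 2^n * 2 := by positivity
  simp only [f_alt, PySem.Int.band_one,
    PySem.Int.mod_eq_emod_of_pos hE,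
    PySem.Int.floordiv_eq_ediv_of_pos hE,
    PySem.Int.mod_eq_emod_of_pos (show (0:Int) < 2 by norm_num),
    PySem.Int.mod_eq_emod_of_pos (show (0:Int) < 4 by norm_num)]
  cases n with
  | zero =>
    norm_num
    split_ifs <;> omega
  | succ k =>
    have hpow : (0:Int) < 2^k := by positivity
    have he : (1:Int) ≤ 2^k := by omega
    have hp2 : (2:Int)^(k+1) * 2 = 4*(2^k) := by ring
    have hp3 : (2:Int)^(k+1+1) = 4*(2^k) := by ring
    have hp1 : (2:Int)^(k+1) = 2*(2^k) := by ring
    rw [hp2, hp3, hp1]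
    exact pv_bit_succ x (x / (4*2^k)) (x % (4*2^k)) (2^k) he rfl

lemma pv_loop_inv (x : Int) (n : Nat) :
    ((PySem.List.pyRange 0 (n : Int) 1).foldl
      (fun (s : Int × Int) (i : Int) =>
        let c := PySem.Int.floordiv x (s.2 * 2) * s.2
        let rest := PySem.Int.mod x (s.2 * 2)
        let c := if rest - s.2 > 0 then c + (rest - s.2) else c
        let ret := if PySem.Int.band c 1 ≠ 0 then s.1 + ((1 : Int) <<< i.toNat) else s.1
        (ret, s.2 <<< (1 : Nat)))
      (0, 1))
    = (f_alt x % (2^n), 2^n) := by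
  induction n with
  | zero =>
    simp [PySem.List.pyRange_one_eq_nil]
  | succ n ih =>
    rw [show ((n+1 : Nat) : Int) = (n : Int) + 1 by push_cast; ring]
    rw [PySem.List.pyRange_one_succ_right (by positivity)]
    rw [List.foldl_append, ih]
    simp only [List.foldl]
    have hsh : ((2:Int)^n) <<< (1:Nat) = 2^(n+1) := by
      rw [Int.shiftLeft_eq]; ring
    have hone : ((1:Int) <<< ((n:Int)).toNat) = 2^n := by
      rw [Int.toNat_natCast, Int.shiftLeft_eq]; ring
    have hb := pv_bit_lemma x n
    rw [hsh, hone]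
    split_ifs at hb ⊢ with h <;> exact Prod.ext (by omega) rfl

lemma pv_f_eq (x : Int) : f x = f_alt x % (2^44) := by
  have h := pv_loop_inv x 44
  unfold f
  norm_num at h ⊢
  rw [h]

lemma pv_falt_cases (x : Int) :
    f_alt x = if x % 4 = 0 then 0 else if x % 4 = 1 then x - 1 else if x % 4 = 2 then 1 else x := by
  simp only [f_alt, PySem.Int.mod_eq_emod_of_pos (show (0:Int) < 4 by norm_num)]

-- ===== VERDICT =====
theorem f_spec : Claim_unchanged_f := by
  intro x hdom hnd
  have hx : -2147483648 ≤ x ∧ x ≤ 2147483648 := by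
    simpa [Dom_f, pvDomInt] using hdom
  have hnd' : ¬ (x < 0 ∧ x % 2 = 1) := by
    intro ⟨h1, h2⟩
    exact hnd ⟨h1, by rw [PySem.Int.mod_eq_emod_of_pos (show (0:Int) < 2 by norm_num)]; exact h2⟩
  unfold Spec_f at *
  rw [pv_f_eq, pv_falt_cases]
  have hb : 0 ≤ (if x % 4 = 0 then (0:Int) else if x % 4 = 1 then x - 1 else if x % 4 = 2 then 1 else x) ∧
      (if x % 4 = 0 then (0:Int) else if x % 4 = 1 then x - 1 else if x % 4 = 2 then 1 else x) < 2^44 := by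
    split_ifs <;> constructor <;> omega
  exact Int.emod_eq_of_lt hb.1 hb.2

theorem f_changed : Claim_changed_f := by
  unfold Claim_changed_f
  refine ⟨by decide, by decide, ?_, by decide, by decide⟩
  show f (-3) = 17592186044412
  rw [pv_f_eq, pv_falt_cases]
  decide

theorem f_tight : Claim_exact_f := by
  intro x hdom hd
  have hx : -2147483648 ≤ x ∧ x ≤ 2147483648 := by
    simpa [Dom_f, pvDomInt] using hdom
  obtain ⟨hneg, hodd⟩ := hd
  have hodd' : x % 2 = 1 := by
    rw [PySem.Int.mod_eq_emod_of_pos (show (0:Int) < 2 by norm_num)] at hodd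
    exact hodd
  rw [pv_f_eq, pv_falt_cases]
  have hv : (if x % 4 = 0 then (0:Int) else if x % 4 = 1 then x - 1 else if x % 4 = 2 then 1 else x) % 2^44
      = (if x % 4 = 0 then (0:Int) else if x % 4 = 1 then x - 1 else if x % 4 = 2 then 1 else x) + 2^44 := by
    have hbound : -(2^44) ≤ (if x % 4 = 0 then (0:Int) else if x % 4 = 1 then x - 1 else if x % 4 = 2 then 1 else x) ∧
        (if x % 4 = 0 then (0:Int) else if x % 4 = 1 then x - 1 else if x % 4 = 2 then 1 else x) < 0 := by
      split_ifs <;> constructor <;> omega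
    have h2 : (if x % 4 = 0 then (0:Int) else if x % 4 = 1 then x - 1 else if x % 4 = 2 then 1 else x)
        = ((if x % 4 = 0 then (0:Int) else if x % 4 = 1 then x - 1 else if x % 4 = 2 then 1 else x) + 2^44) + 2^44*(-1) := by ring
    calc (if x % 4 = 0 then (0:Int) else if x % 4 = 1 then x - 1 else if x % 4 = 2 then 1 else x) % 2^44
        = (((if x % 4 = 0 then (0:Int) else if x % 4 = 1 then x - 1 else if x % 4 = 2 then 1 else x) + 2^44) + 2^44*(-1)) % 2^44 := by rw [← h2]
      _ = ((if x % 4 = 0 then (0:Int) else if x % 4 = 1 then x - 1 else if x % 4 = 2 then 1 else x) + 2^44) % 2^44 := by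
            rw [Int.add_mul_emod_self_left]
      _ = (if x % 4 = 0 then (0:Int) else if x % 4 = 1 then x - 1 else if x % 4 = 2 then 1 else x) + 2^44 := by
            exact Int.emod_eq_of_lt (by omega) (by omega)
  rw [hv]
  omega
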